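-- pv_equiv track=rewrite | github.com/pypi-data/pypi-mirror-390 | packages/lt-utils/lt_utils-0.2.0.4.tar.gz/lt_utils-0.2.0.4/lt_utils/_internal/texts/requoter.py | _update_text
-- ===== SOURCE A (Python) =====
-- from typing import List
--
-- def _update_text(positions: List[int], text: str, q1: str = "“", q2: str = "”") -> str:
--     """
--     Update the text by enclosing specified positions with given quotation marks.
--
--     Args:
--         positions (List[int]): A list of positions where quotation marks should be applied.
--         text (str): The input text.
--         q1 (str, optional): The opening quotation mark. Defaults to "“".
--         q2 (str, optional): The closing quotation mark. Defaults to "”".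
--
--     Returns:
--         str: The updated text with specified positions enclosed by the given quotation marks.
--     """
--     if not positions:
--         return text
--     split_version = [positions[i : i + 2] for i in range(0, len(positions), 2)]
--     for i, pair in enumerate(split_version):
--         if len(pair) == 2:
--             text = (
--                 text[: pair[0]]
--                 + q1
--                 + text[pair[0] + 1 : pair[1]]
--                 + q2
--                 + text[pair[1] + 1 :]
--             )
--         else:
--             text = text[: pair[0]] + q1 + text[pair[0] + 1 :]
--
--     return text
-- ===== SOURCE B (Python) =====
-- from typing import List
--
-- def _update_text(positions: List[int], text: str, q1: str = "\u201c", q2: str = "\u201d") -> str: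
--     # Rope-style implementation: the text is kept as a list of string fragments;
--     # each quoted range is cut out of the fragments (slice.indices resolves the
--     # bounds against the current total length) and the string is joined once at
--     # the end instead of being rebuilt after every pair.
--     pieces = [text]
--
--     def fragments(sl: slice) -> List[str]:
--         """The fragments making up the given slice of the virtual string."""
--         total = sum(map(len, pieces))
--         lo, hi, _ = sl.indices(total)
--         out, off = [], 0
--         for p in pieces:
--             part = p[max(lo - off, 0):max(hi - off, 0)]
--             if part:
--                 out.append(part)
--             off += len(p)
--         return out
--
--     it = iter(positions)
--     for a in it:
--         b = next(it, None)
--         if b is None: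
--             pieces = fragments(slice(None, a)) + [q1] + fragments(slice(a + 1, None))
--         else:
--             pieces = (fragments(slice(None, a)) + [q1] + fragments(slice(a + 1, b))
--                       + [q2] + fragments(slice(b + 1, None)))
--     return "".join(pieces)
-- ===== Notes on version B (the rewrite author's own statement) =====
-- stated objective: alternative
-- what changed: B keeps the text as a rope-style list of string fragments: each quoted range is cut out of the fragments (bounds resolved with slice.indices against the current total length) while consuming the positions pairwise from an iterator, and the result is joined once at the end, instead of rebuilding the whole string with five slices after every pair.
import Mathlib
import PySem

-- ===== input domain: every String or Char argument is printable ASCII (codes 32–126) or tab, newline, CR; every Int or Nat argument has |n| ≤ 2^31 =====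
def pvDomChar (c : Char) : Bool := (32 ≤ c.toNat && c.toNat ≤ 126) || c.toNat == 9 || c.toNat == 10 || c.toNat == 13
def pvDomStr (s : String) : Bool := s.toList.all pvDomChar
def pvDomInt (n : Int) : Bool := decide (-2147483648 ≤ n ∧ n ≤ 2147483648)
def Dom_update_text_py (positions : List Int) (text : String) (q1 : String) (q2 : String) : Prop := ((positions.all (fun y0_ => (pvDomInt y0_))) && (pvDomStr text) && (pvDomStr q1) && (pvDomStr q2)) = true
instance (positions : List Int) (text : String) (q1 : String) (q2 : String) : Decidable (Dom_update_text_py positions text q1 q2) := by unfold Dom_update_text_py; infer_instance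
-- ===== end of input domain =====

-- B keeps the text as a list of fragments cut by slice bounds (slice.indices) and joins once
-- at the end, instead of rebuilding the whole string per pair (objective: alternative).


-- ===== PORT A =====
-- helper: the body of A's `for i, pair in enumerate(split_version)` loop (i itself is unused
-- except to enumerate; string slicing/concatenation is ported on `.toList` — PySem.Str slices
-- are thin wrappers over PySem.List on `.toList`, so this is exact).
def pvStepA (q1 q2 : String) (t : List Char) (pair : List Int) : List Char :=
  if PySem.List.len pair = 2 then
    -- text = text[:pair[0]] + q1 + text[pair[0]+1 : pair[1]] + q2 + text[pair[1]+1 :]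
    PySem.List.slice t none (some (PySem.List.pyGetD pair 0 0))
      ++ q1.toList
      ++ PySem.List.slice t (some (PySem.List.pyGetD pair 0 0 + 1)) (some (PySem.List.pyGetD pair 1 0))
      ++ q2.toList
      ++ PySem.List.slice t (some (PySem.List.pyGetD pair 1 0 + 1)) none
  else
    -- text = text[:pair[0]] + q1 + text[pair[0]+1 :]
    PySem.List.slice t none (some (PySem.List.pyGetD pair 0 0))
      ++ q1.toList
      ++ PySem.List.slice t (some (PySem.List.pyGetD pair 0 0 + 1)) none

def update_text_py (positions : List Int) (text : String) (q1 : String) (q2 : String) : String :=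
  if positions = [] then text      -- if not positions: return text
  else
    -- split_version = [positions[i : i + 2] for i in range(0, len(positions), 2)]
    String.ofList <|
      (((PySem.List.pyRange 0 (PySem.List.len positions) 2).map
          (fun i => PySem.List.slice positions (some i) (some (i + 2)))).foldl
        (pvStepA q1 q2) text.toList)

-- ===== PORT B =====
-- pieces are Python strings, ported as List Char; "".join(pieces) is .flatten.
-- helper: slice.indices(total) bound normalization (a negative index counts from the end,
-- then the result is clamped to [0, total]) — exact for step 1, which is what Source B uses
def pvNorm (i total : Int) : Int :=
  let j := if i < 0 then i + total else i
  if j < 0 then 0 else if j > total then total else j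

-- helper: fragments' `for p in pieces` loop (out built front-to-back; off is the running offset)
def pvFragGo (lo hi : Int) : List (List Char) → Int → List (List Char)
  | [], _ => []
  | p :: r, off =>
    let s := PySem.List.slice p (some (max (lo - off) 0)) (some (max (hi - off) 0))
    if s ≠ [] then s :: pvFragGo lo hi r (off + PySem.List.len p)
    else pvFragGo lo hi r (off + PySem.List.len p)

-- helper: Source B's fragments(slice(lo, hi)) — the fragments making up text[lo:hi]
def pvFrag (pieces : List (List Char)) (lo? hi? : Option Int) : List (List Char) :=
  let total := (pieces.map PySem.List.len).sum
  let lo := match lo? with | none => 0 | some i => pvNorm i total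
  let hi := match hi? with | none => total | some i => pvNorm i total
  pvFragGo lo hi pieces 0

-- helper: Source B's `for a in it` loop with `b = next(it, None)` (two positions per step)
def pvAltGo (q1 q2 : String) : List Int → List (List Char) → List (List Char)
  | [], pieces => pieces
  | [a], pieces =>
    pvFrag pieces none (some a) ++ [q1.toList] ++ pvFrag pieces (some (a + 1)) none
  | a :: b :: r, pieces =>
    pvAltGo q1 q2 r
      (pvFrag pieces none (some a) ++ [q1.toList] ++ pvFrag pieces (some (a + 1)) (some b)
        ++ [q2.toList] ++ pvFrag pieces (some (b + 1)) none)

def update_text_py_alt (positions : List Int) (text : String) (q1 : String) (q2 : String) : String :=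
  String.ofList (pvAltGo q1 q2 positions [text.toList]).flatten

-- ===== PRECONDITION & SPEC =====
def Spec_update_text_py (positions : List Int) (text : String) (q1 : String) (q2 : String) (out : String) : Prop := out = update_text_py_alt positions text q1 q2
instance (positions : List Int) (text : String) (q1 : String) (q2 : String) (out : String) : Decidable (Spec_update_text_py positions text q1 q2 out) := by unfold Spec_update_text_py; infer_instance

-- ===== CLAIM (what is proved, stated in full; the proofs are below) =====
def Claim_equal_update_text_py : Prop := ∀ (positions : List Int) (text : String) (q1 : String) (q2 : String), Dom_update_text_py positions text q1 q2 → Spec_update_text_py positions text q1 q2 (update_text_py positions text q1 q2)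

-- ===== LEMMAS AND PROOFS =====

-- the list of consecutive pairs (a trailing singleton kept), as A's comprehension builds it
def pvChunk2 : List Int → List (List Int)
  | [] => []
  | [a] => [[a]]
  | a :: b :: r => [a, b] :: pvChunk2 r

theorem pv_range_drop_take : ∀ ps : List Int,
    (List.range ((ps.length + 1) / 2)).map (fun k => (ps.drop (2*k)).take 2) = pvChunk2 ps
  | [] => by simp [pvChunk2]
  | [a] => by simp [pvChunk2]
  | a :: b :: r => by
    have ih := pv_range_drop_take r
    have hlen : ((a :: b :: r).length + 1) / 2 = (r.length + 1) / 2 + 1 := by simp; omega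
    rw [hlen, List.range_succ_eq_map]
    simp only [List.map_cons, List.map_map, pvChunk2]
    refine congrArg₂ List.cons rfl ?_
    rw [← ih]
    refine List.map_congr_left (fun k _ => ?_)
    have e : 2 * (k + 1) = 2 * k + 1 + 1 := by ring
    simp [Function.comp, e]

theorem pv_chunks_eq (ps : List Int) :
    (PySem.List.pyRange 0 (PySem.List.len ps) 2).map
      (fun i => PySem.List.slice ps (some i) (some (i + 2))) = pvChunk2 ps := by
  have hr : PySem.List.pyRange 0 (PySem.List.len ps) 2
      = (List.range ((ps.length + 1) / 2)).map (fun k : Nat => ((2 * k : Nat) : Int)) := by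
    simp only [PySem.List.len_eq, PySem.List.pyRange]
    rw [if_neg (by norm_num), if_pos (by norm_num)]
    have hc : (if (0:Int) < (ps.length : Int) then (((ps.length : Int) - 0 + 2 - 1) / 2).toNat else 0)
        = (ps.length + 1) / 2 := by
      split_ifs with h <;> omega
    rw [hc]
    exact List.map_congr_left (fun k _ => by push_cast; ring)
  rw [hr, List.map_map, ← pv_range_drop_take ps]
  refine List.map_congr_left (fun k _ => ?_)
  have e2 : ((2 * k : Nat) : Int) + 2 = ((2 * k : Nat) : Int) + ((2 : Nat) : Int) := by push_cast; ring
  simp only [Function.comp]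
  rw [e2, PySem.List.slice_natCast_add]

-- drop/take of an append, in the saturated-subtraction form the fragment walk produces
theorem pv_nslice_append (p r : List Char) (x y : Nat) :
    ((p ++ r).drop x).take (y - x)
      = ((p.drop x).take (y - x)) ++ ((r.drop (x - p.length)).take ((y - p.length) - (x - p.length))) := by
  rw [List.drop_append, List.take_append]
  congr 1
  · congr 1
    rw [List.length_drop]
    omega

theorem pv_fragGo_flatten : ∀ (pieces : List (List Char)) (lo hi off : Int),
    (pvFragGo lo hi pieces off).flatten
      = ((pieces.flatten.drop (lo - off).toNat).take ((hi - off).toNat - (lo - off).toNat))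
  | [], lo, hi, off => by simp [pvFragGo]
  | p :: r, lo, hi, off => by
    have ih := pv_fragGo_flatten r lo hi (off + (p.length : Int))
    have hs : PySem.List.slice p (some (max (lo - off) 0)) (some (max (hi - off) 0))
        = (p.drop (lo - off).toNat).take ((hi - off).toNat - (lo - off).toNat) := by
      rw [PySem.List.slice_toNat p (by omega) (by omega)]
      have e1 : (max (lo - off) 0).toNat = (lo - off).toNat := by omega
      have e2 : (max (hi - off) 0).toNat = (hi - off).toNat := by omega
      rw [e1, e2]
    have key : (((p :: r).flatten.drop (lo - off).toNat).take ((hi - off).toNat - (lo - off).toNat))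
        = ((p.drop (lo - off).toNat).take ((hi - off).toNat - (lo - off).toNat))
          ++ (pvFragGo lo hi r (off + PySem.List.len p)).flatten := by
      rw [List.flatten_cons, pv_nslice_append, PySem.List.len_eq, ih]
      have e1 : (lo - (off + (p.length : Int))).toNat = (lo - off).toNat - p.length := by omega
      have e2 : (hi - (off + (p.length : Int))).toNat = (hi - off).toNat - p.length := by omega
      rw [e1, e2]
    simp only [pvFragGo]
    split_ifs with h
    · rw [List.flatten_cons, hs, key]
    · rw [key, ← hs]
      simp only [ne_eq, not_not] at h
      rw [h, List.nil_append]

theorem pv_sum_map_len : ∀ pieces : List (List Char),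
    (pieces.map PySem.List.len).sum = (pieces.flatten.length : Int)
  | [] => by simp
  | p :: r => by
    have ih := pv_sum_map_len r
    simp [PySem.List.len_eq, ih]

theorem pv_norm_eq (i : Int) (n : Nat) : pvNorm i (n : Int) = ((PySem.List.clampIdx n i : Nat) : Int) := by
  simp only [pvNorm, PySem.List.clampIdx]
  split_ifs <;> omega

theorem pv_frag_flatten (pieces : List (List Char)) (lo? hi? : Option Int) :
    (pvFrag pieces lo? hi?).flatten = PySem.List.slice pieces.flatten lo? hi? := by
  have hsum : (pieces.map PySem.List.len).sum = ((pieces.flatten.length : Nat) : Int) :=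
    pv_sum_map_len pieces
  cases lo? with
  | none =>
    cases hi? with
    | none =>
      simp only [pvFrag, PySem.List.slice, hsum]
      rw [pv_fragGo_flatten]; congr 1
    | some b =>
      simp only [pvFrag, PySem.List.slice, hsum]
      rw [pv_norm_eq, pv_fragGo_flatten]; congr 1
  | some a =>
    cases hi? with
    | none =>
      simp only [pvFrag, PySem.List.slice, hsum]
      rw [pv_norm_eq, pv_fragGo_flatten]; congr 1
    | some b =>
      simp only [pvFrag, PySem.List.slice, hsum]
      rw [pv_norm_eq, pv_norm_eq, pv_fragGo_flatten]; congr 1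

-- the flattened fragment update for one pair is exactly A's loop body
theorem pv_step_pair (pieces : List (List Char)) (a b : Int) (q1 q2 : String) :
    (pvFrag pieces none (some a) ++ [q1.toList] ++ pvFrag pieces (some (a+1)) (some b)
      ++ [q2.toList] ++ pvFrag pieces (some (b+1)) none).flatten
    = pvStepA q1 q2 pieces.flatten [a, b] := by
  simp only [pvStepA]
  rw [if_pos (by simp [PySem.List.len_eq]),
      show PySem.List.pyGetD [a, b] 0 0 = a from rfl,
      show PySem.List.pyGetD [a, b] 1 0 = b from rfl]
  simp [List.flatten_append, pv_frag_flatten]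

theorem pv_step_one (pieces : List (List Char)) (a : Int) (q1 q2 : String) :
    (pvFrag pieces none (some a) ++ [q1.toList] ++ pvFrag pieces (some (a+1)) none).flatten
    = pvStepA q1 q2 pieces.flatten [a] := by
  simp only [pvStepA]
  rw [if_neg (by simp [PySem.List.len_eq]),
      show PySem.List.pyGetD [a] 0 0 = a from rfl]
  simp [List.flatten_append, pv_frag_flatten]

theorem pv_altGo_flatten (q1 q2 : String) : ∀ (ps : List Int) (pieces : List (List Char)),
    (pvAltGo q1 q2 ps pieces).flatten = (pvChunk2 ps).foldl (pvStepA q1 q2) pieces.flatten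
  | [], pieces => by simp [pvAltGo, pvChunk2]
  | [a], pieces => by
    simp only [pvAltGo, pvChunk2, List.foldl_cons, List.foldl_nil]
    exact pv_step_one pieces a q1 q2
  | a :: b :: r, pieces => by
    have ih := pv_altGo_flatten q1 q2 r
      (pvFrag pieces none (some a) ++ [q1.toList] ++ pvFrag pieces (some (a + 1)) (some b)
        ++ [q2.toList] ++ pvFrag pieces (some (b + 1)) none)
    simp only [pvAltGo, pvChunk2, List.foldl_cons]
    rw [ih, pv_step_pair pieces a b q1 q2]

-- ===== VERDICT (by name: the statement is the Claim_ definition above) =====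
theorem update_text_py_spec : Claim_equal_update_text_py := by
  intro positions text q1 q2 _
  unfold Spec_update_text_py update_text_py update_text_py_alt
  rw [pv_altGo_flatten q1 q2 positions [text.toList]]
  simp only [List.flatten_cons, List.flatten_nil, List.append_nil]
  by_cases hps : positions = []
  · subst hps
    rw [if_pos rfl]
    simp [pvChunk2, String.ofList_toList]
  · rw [if_neg hps, pv_chunks_eq]
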